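-- pv_equiv track=rewrite | github.com/tony-ngok/em-scrapy | pharmacyonline/pharmacyonline/spiders/po_cats.py | valid_cat_name
-- ===== SOURCE A (Python) =====
-- def valid_cat_name(cat_name: str):
--     if not cat_name:
--         return False
--
--     cat_filters = ['family planning', 'sexual', 'ovulation', 'pregnancy', 'sperm', 'gender']
--     for filt in cat_filters:
--         if filt in cat_name:
--             return False
--     return True
-- ===== SOURCE B (Python) =====
-- import re
--
-- _FORBIDDEN_RE = re.compile('family planning|sexual|ovulation|pregnancy|sperm|gender')
--
-- def valid_cat_name(cat_name: str):
--     if not cat_name: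
--         return False
--     return _FORBIDDEN_RE.search(cat_name) is None
-- ===== Notes on version B (the rewrite author's own statement) =====
-- stated objective: idiomatic
-- what changed: Replaces the explicit loop of six separate substring membership checks with a single precompiled regex alternation scanned once over the name (re.search returning None means valid).
import Mathlib
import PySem

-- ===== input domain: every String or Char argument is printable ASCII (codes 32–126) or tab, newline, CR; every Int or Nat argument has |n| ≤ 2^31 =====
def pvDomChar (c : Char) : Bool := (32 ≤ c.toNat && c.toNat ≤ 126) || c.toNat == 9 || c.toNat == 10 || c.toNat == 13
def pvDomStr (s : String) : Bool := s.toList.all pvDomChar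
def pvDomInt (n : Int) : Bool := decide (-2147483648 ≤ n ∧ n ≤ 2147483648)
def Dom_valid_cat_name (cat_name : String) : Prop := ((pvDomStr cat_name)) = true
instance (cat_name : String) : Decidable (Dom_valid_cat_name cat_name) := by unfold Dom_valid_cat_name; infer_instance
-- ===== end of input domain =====

-- B replaces A's explicit loop of six substring 'in' checks by a single regex-alternation
-- scan (one left-to-right pass trying each alternative at each position); return values only.

-- ===== PORT A =====
-- 'for filt in cat_filters: if filt in cat_name: return False' as structural recursion on the list
def validCatLoop (filters : List String) (cat_name : String) : Bool :=
  match filters with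
  | [] => true
  | f :: rest => if PySem.Str.isIn f cat_name then false else validCatLoop rest cat_name

def valid_cat_name (cat_name : String) : Bool :=
  if cat_name.toList = [] then false
  else
    validCatLoop ["family planning", "sexual", "ovulation", "pregnancy", "sperm", "gender"] cat_name

-- ===== PORT B =====
-- the regex alternation's alternatives, as char lists
def pvAlts : List (List Char) := ["family planning".toList, "sexual".toList, "ovulation".toList, "pregnancy".toList, "sperm".toList, "gender".toList]

-- does some alternative match at the current position? (one step of the automaton scan)
def pvMatchHere (s : List Char) : Bool := pvAlts.any (fun p => p.isPrefixOf s)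

-- the regex search: try the alternation at each position left to right
def pvSearch (s : List Char) : Bool :=
  match s with
  | [] => pvMatchHere []
  | _ :: rest => pvMatchHere s || pvSearch rest

def valid_cat_name_alt (cat_name : String) : Bool :=
  if cat_name.toList = [] then false
  else !pvSearch cat_name.toList

-- ===== PRECONDITION & SPEC =====
def Spec_valid_cat_name (cat_name : String) (out : Bool) : Prop := out = valid_cat_name_alt cat_name
instance (cat_name : String) (out : Bool) : Decidable (Spec_valid_cat_name cat_name out) := by unfold Spec_valid_cat_name; infer_instance

-- ===== CLAIM (what is proved, stated in full; the proofs are below) =====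
def Claim_equal_valid_cat_name : Prop := ∀ (cat_name : String), Dom_valid_cat_name cat_name → Spec_valid_cat_name cat_name (valid_cat_name cat_name)

-- ===== LEMMAS AND PROOFS =====

theorem pvSearch_iff (s : List Char) :
    pvSearch s = true ↔ ∃ p ∈ pvAlts, p <:+: s := by
  induction s with
  | nil =>
    simp [pvSearch, pvMatchHere, List.any_eq_true, List.infix_nil]
  | cons c rest ih =>
    simp only [pvSearch, Bool.or_eq_true, ih, pvMatchHere, List.any_eq_true]
    constructor
    · rintro (⟨p, hp, hpre⟩ | ⟨p, hp, hinf⟩)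
      · exact ⟨p, hp, (List.isPrefixOf_iff_prefix.mp (by simpa using hpre)).isInfix⟩
      · exact ⟨p, hp, hinf.trans (List.suffix_cons c rest).isInfix⟩
    · rintro ⟨p, hp, hinf⟩
      rcases List.infix_cons_iff.mp hinf with h | h
      · exact Or.inl ⟨p, hp, by simpa using List.isPrefixOf_iff_prefix.mpr h⟩
      · exact Or.inr ⟨p, hp, h⟩

theorem validCatLoop_iff (filters : List String) (s : String) :
    validCatLoop filters s = true ↔ ∀ f ∈ filters, ¬ f.toList <:+: s.toList := by
  induction filters with
  | nil => simp [validCatLoop]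
  | cons f rest ih =>
    simp only [validCatLoop]
    rcases h : PySem.Str.isIn f s with _ | _
    · have hn : ¬ f.toList <:+: s.toList :=
        (PySem.Chars.isIn_eq_false_iff _ _).mp (by simpa using h)
      simp [ih, hn]
    · have hi : f.toList <:+: s.toList :=
        (PySem.Chars.isIn_iff_infix _ _).mp (by simpa using h)
      simp [hi]

-- ===== VERDICT (by name: the statement is the Claim_ definition above) =====
theorem valid_cat_name_spec : Claim_equal_valid_cat_name := by
  intro s _
  unfold Spec_valid_cat_name valid_cat_name valid_cat_name_alt
  by_cases he : s.toList = []
  · simp [he]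
  · simp only [he, if_false]
    rcases hb : pvSearch s.toList with _ | _
    · have : ∀ p ∈ pvAlts, ¬ p <:+: s.toList := by
        intro p hp hc
        have := (pvSearch_iff s.toList).mpr ⟨p, hp, hc⟩
        simp [this] at hb
      simp only [Bool.not_false]
      rw [validCatLoop_iff]
      intro f hf
      fin_cases hf <;> exact this _ (by simp [pvAlts])
    · rcases (pvSearch_iff s.toList).mp hb with ⟨p, hp, hinf⟩
      simp only [Bool.not_true]
      rw [Bool.eq_false_iff, Ne, validCatLoop_iff]
      intro hall
      fin_cases hp <;> exact hall _ (by simp) hinf
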